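-- pv_equiv track=rewrite | github.com/PJHgh/Algorithm | CodingTest/programmers/퍼즐 조각 채우기/solution.py | get_blanks
-- ===== SOURCE A (Python) =====
-- from collections import deque
--
-- def get_blanks(n, game_board):
--     blanks = []
--     for y in range(n):
--         for x in range(n):
--             if game_board[y][x] == 0:
--                 blank = []
--                 queue = deque([(y, x)])
--                 game_board[y][x] = 1
--                 while queue:
--                     now_y, now_x = queue.pop()
--                     blank.append((now_y, now_x))
--                     for dx, dy in [(1, 0), (-1, 0), (0, 1), (0, -1)]:
--                         if now_x+dx < 0 or now_x+dx >= n or now_y+dy < 0 or now_y+dy >= n: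
--                             continue
--                         elif game_board[now_y+dy][now_x+dx] == 0:
--                             queue.append((now_y+dy, now_x+dx))
--                             game_board[now_y+dy][now_x+dx] = 1
--                 blank.sort(key=lambda p:(p[0], p[1]))
--                 blank = list(map(lambda p:(p[0]-y, p[1]-x), blank))
--                 blanks.append(blank)
--     return blanks
-- ===== SOURCE B (Python) =====
-- def get_blanks(n, game_board):
--     blanks = []
--     for y in range(n):
--         for x in range(n):
--             if game_board[y][x] != 0:
--                 continue
--             game_board[y][x] = 1
--             blank = []
--             frontier = [(y, x)]
--             while frontier:
--                 nxt = []
--                 for cy, cx in frontier: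
--                     blank.append((cy, cx))
--                     for ny, nx in ((cy - 1, cx), (cy + 1, cx), (cy, cx - 1), (cy, cx + 1)):
--                         if 0 <= ny < n and 0 <= nx < n and game_board[ny][nx] == 0:
--                             game_board[ny][nx] = 1
--                             nxt.append((ny, nx))
--                 frontier = nxt
--             blank.sort()
--             blanks.append([(cy - y, cx - x) for cy, cx in blank])
--     return blanks
-- ===== Notes on version B (the rewrite author's own statement) =====
-- stated objective: alternative
-- what changed: A flood-fills each blank component with a LIFO deque (stack order, marking on push); B replaces that with a level-synchronous frontier search that processes whole BFS layers and collects the next frontier per round — a different traversal order with a proof that the collected set (and the board mutation) is order-independent.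
import Mathlib
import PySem

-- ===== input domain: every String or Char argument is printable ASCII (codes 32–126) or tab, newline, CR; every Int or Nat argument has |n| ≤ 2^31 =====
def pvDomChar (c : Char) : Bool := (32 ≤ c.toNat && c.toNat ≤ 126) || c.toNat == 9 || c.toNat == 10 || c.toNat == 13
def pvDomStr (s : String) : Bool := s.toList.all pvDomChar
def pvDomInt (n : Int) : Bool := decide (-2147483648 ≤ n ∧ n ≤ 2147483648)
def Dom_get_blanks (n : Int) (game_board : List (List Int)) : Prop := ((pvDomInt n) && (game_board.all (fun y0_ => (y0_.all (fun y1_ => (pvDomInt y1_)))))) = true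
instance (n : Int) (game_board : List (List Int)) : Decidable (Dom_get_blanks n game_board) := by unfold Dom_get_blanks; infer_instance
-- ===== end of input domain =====

-- B replaces A's LIFO deque flood fill by a level-synchronous frontier search (alternative
-- decomposition, same cost); both Pythons mutate game_board identically, and the equivalence
-- proved here is about the return value.

-- ===== PORT A =====
-- A-side helpers.  Every board index at a call site is ≥ 0 (it comes from range(n) or has passed
-- the 0 ≤ · bound guard), so Nat indexing with a default is exact there; the default is never hit
-- inside Pre_ (Python raises IndexError exactly where Pre_ fails).
def pvCellA (g : List (List Int)) (y x : Int) : Int := (g.getD y.toNat []).getD x.toNat 1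

def pvSetA (g : List (List Int)) (y x v : Int) : List (List Int) :=
  g.set y.toNat ((g.getD y.toNat []).set x.toNat v)

def pvDirsA : List (Int × Int) := [(1, 0), (-1, 0), (0, 1), (0, -1)]

-- the 'while queue' loop; queue.pop() takes the LAST element.  The fuel n.toNat*n.toNat+1 passed
-- below is proven sufficient inside Pre_ (the loop always ends on the empty-queue test, not fuel).
def pvLoopA (n : Int) : Nat → List (List Int) → List (Int × Int) → List (Int × Int) →
    (List (List Int)) × List (Int × Int)
  | 0, g, _, blank => (g, blank)
  | fuel+1, g, q, blank =>
    if q = [] then (g, blank)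
    else
      let e := q.getLastD (0, 0)
      let blank' := blank ++ [e]
      let st := pvDirsA.foldl (fun (s : (List (List Int)) × List (Int × Int)) d =>
          if e.2 + d.1 < 0 ∨ n ≤ e.2 + d.1 ∨ e.1 + d.2 < 0 ∨ n ≤ e.1 + d.2 then s
          else if pvCellA s.1 (e.1 + d.2) (e.2 + d.1) = 0 then
            (pvSetA s.1 (e.1 + d.2) (e.2 + d.1) 1, s.2 ++ [(e.1 + d.2, e.2 + d.1)])
          else s)
        (g, q.dropLast)
      pvLoopA n fuel st.1 st.2 blank'

def get_blanks (n : Int) (game_board : List (List Int)) : List (List (Int × Int)) :=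
  ((PySem.List.pyRange 0 n 1).foldl (fun (st : (List (List Int)) × List (List (Int × Int))) y =>
    (PySem.List.pyRange 0 n 1).foldl (fun st x =>
      if pvCellA st.1 y x = 0 then
        ((pvLoopA n (n.toNat * n.toNat + 1) (pvSetA st.1 y x 1) [(y, x)] []).1,
         st.2 ++ [(PySem.List.sorted2
            (pvLoopA n (n.toNat * n.toNat + 1) (pvSetA st.1 y x 1) [(y, x)] []).2
            Prod.fst Prod.snd).map (fun p => (p.1 - y, p.2 - x))])
      else st) st)
    (game_board, [])).2

-- ===== PORT B =====
-- B-side helpers (cell read/write are shared with port A: both transliterate the same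
-- Python subscript expressions 'game_board[i][j]' / 'game_board[i][j] = v').
def pvNbrsB (c : Int × Int) : List (Int × Int) :=
  [(c.1 - 1, c.2), (c.1 + 1, c.2), (c.1, c.2 - 1), (c.1, c.2 + 1)]

-- one round of the level-synchronous search: visit every frontier cell, collect the next frontier
def pvLayerB (n : Int) (fr : List (Int × Int)) (g : List (List Int))
    (nxt blank : List (Int × Int)) :
    (List (List Int)) × List (Int × Int) × List (Int × Int) :=
  fr.foldl (fun (s : (List (List Int)) × List (Int × Int) × List (Int × Int)) c =>
      let t := (pvNbrsB c).foldl (fun (t : (List (List Int)) × List (Int × Int)) d =>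
          if 0 ≤ d.1 ∧ d.1 < n ∧ 0 ≤ d.2 ∧ d.2 < n ∧ pvCellA t.1 d.1 d.2 = 0 then
            (pvSetA t.1 d.1 d.2 1, t.2 ++ [d])
          else t)
        (s.1, s.2.1)
      (t.1, t.2, s.2.2 ++ [c]))
    (g, nxt, blank)

-- the 'while frontier' loop; fuel n.toNat*n.toNat+1 is proven sufficient inside Pre_
def pvLoopB (n : Int) : Nat → List (List Int) → List (Int × Int) → List (Int × Int) →
    (List (List Int)) × List (Int × Int)
  | 0, g, _, blank => (g, blank)
  | fuel+1, g, fr, blank =>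
    if fr = [] then (g, blank)
    else
      let t := pvLayerB n fr g [] blank
      pvLoopB n fuel t.1 t.2.1 t.2.2

def get_blanks_alt (n : Int) (game_board : List (List Int)) : List (List (Int × Int)) :=
  ((PySem.List.pyRange 0 n 1).foldl (fun (st : (List (List Int)) × List (List (Int × Int))) y =>
    (PySem.List.pyRange 0 n 1).foldl (fun st x =>
      if pvCellA st.1 y x ≠ 0 then st
      else
        ((pvLoopB n (n.toNat * n.toNat + 1) (pvSetA st.1 y x 1) [(y, x)] []).1,
         st.2 ++ [(PySem.List.sorted2
            (pvLoopB n (n.toNat * n.toNat + 1) (pvSetA st.1 y x 1) [(y, x)] []).2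
            Prod.fst Prod.snd).map (fun p => (p.1 - y, p.2 - x))]))
      st)
    (game_board, [])).2

-- ===== PRECONDITION & SPEC =====
-- Python A raises IndexError iff the n×n window exceeds the board: fewer than n rows, or one of
-- the first n rows shorter than n.  Pre_ admits exactly the inputs on which A returns.
def Pre_get_blanks (n : Int) (game_board : List (List Int)) : Prop :=
  n.toNat ≤ game_board.length ∧ ∀ r ∈ game_board.take n.toNat, n.toNat ≤ r.length
instance (n : Int) (game_board : List (List Int)) : Decidable (Pre_get_blanks n game_board) := by
  unfold Pre_get_blanks; infer_instance

def pvWitness_get_blanks : Int × List (List Int) := (2, [[0, 1], [1, 0]])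

def Spec_get_blanks (n : Int) (game_board : List (List Int)) (out : List (List (Int × Int))) : Prop := out = get_blanks_alt n game_board
instance (n : Int) (game_board : List (List Int)) (out : List (List (Int × Int))) : Decidable (Spec_get_blanks n game_board out) := by unfold Spec_get_blanks; infer_instance

-- ===== CLAIM (what is proved, stated in full; the proofs are below) =====
def Claim_equal_get_blanks : Prop := ∀ (n : Int) (game_board : List (List Int)), Dom_get_blanks n game_board → Pre_get_blanks n game_board → Spec_get_blanks n game_board (get_blanks n game_board)

-- ===== LEMMAS AND PROOFS =====

-- vocabulary of the proof
def pvInb (n : Int) (c : Int × Int) : Prop := 0 ≤ c.1 ∧ c.1 < n ∧ 0 ≤ c.2 ∧ c.2 < n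

def pvEnt (g : List (List Int)) (i j : Nat) : Option Int := g[i]?.bind (fun r => r[j]?)

def pvInbB (n : Int) (c : Int × Int) : Bool :=
  decide (0 ≤ c.1) && decide (c.1 < n) && decide (0 ≤ c.2) && decide (c.2 < n)

def pvZeroB (n : Int) (g : List (List Int)) (c : Int × Int) : Bool :=
  pvInbB n c && (pvCellA g c.1 c.2 == 0)

-- canonical neighbour list (A's visiting order)
def pvNb (c : Int × Int) : List (Int × Int) :=
  [(c.1, c.2 + 1), (c.1, c.2 - 1), (c.1 + 1, c.2), (c.1 - 1, c.2)]

inductive pvReach (n : Int) (g : List (List Int)) (s : Int × Int) : Int × Int → Prop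
  | refl : pvReach n g s s
  | step {c d : Int × Int} : pvReach n g s c → d ∈ pvNb c → pvZeroB n g d = true → pvReach n g s d

def pvFresh (n : Int) (g : List (List Int)) (nb : List (Int × Int)) : List (Int × Int) :=
  nb.filter (pvZeroB n g)

def pvMark (g : List (List Int)) (l : List (Int × Int)) : List (List Int) :=
  l.foldl (fun h d => pvSetA h d.1 d.2 1) g

def pvPush (n : Int) (s : (List (List Int)) × List (Int × Int)) (d : Int × Int) :
    (List (List Int)) × List (Int × Int) :=
  if pvZeroB n s.1 d then (pvSetA s.1 d.1 d.2 1, s.2 ++ [d]) else s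

noncomputable def pvWin (n : Int) : Finset (Int × Int) := (Finset.Icc 0 (n - 1)) ×ˢ (Finset.Icc 0 (n - 1))

noncomputable def pvU (n : Int) (g0 : List (List Int)) (M : List (Int × Int)) : Finset (Int × Int) :=
  (pvWin n).filter (fun c => (pvZeroB n g0 c && !(M.contains c)) = true)

structure pvInv (n : Int) (g0 : List (List Int)) (s : Int × Int) (g : List (List Int))
    (pend blank : List (Int × Int)) : Prop where
  nodup : (blank ++ pend).Nodup
  reach : ∀ c ∈ blank ++ pend, pvReach n g0 s c
  zero : ∀ c ∈ blank ++ pend, pvZeroB n g0 c = true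
  shape : g.map List.length = g0.map List.length
  board : ∀ i j : Nat, pvEnt g i j =
    if ((i : Int), (j : Int)) ∈ blank ++ pend then some 1 else pvEnt g0 i j
  closed : ∀ c ∈ blank, ∀ d ∈ pvNb c, pvZeroB n g0 d = true → d ∈ blank ++ pend
  start : s ∈ blank ++ pend

-- ---- basic board lemmas ----

lemma pvIntPair_eq (d : Int × Int) (h1 : 0 ≤ d.1) (h2 : 0 ≤ d.2) :
    ((d.1.toNat : Int), (d.2.toNat : Int)) = d := by
  simp [Int.toNat_of_nonneg h1, Int.toNat_of_nonneg h2]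

lemma pvCellA_eq_ent (g : List (List Int)) (y x : Int) :
    pvCellA g y x = (pvEnt g y.toNat x.toNat).getD 1 := by
  cases h : g[y.toNat]? <;>
    simp [pvCellA, pvEnt, List.getD_eq_getElem?_getD, h]

lemma pvInbB_iff (n : Int) (c : Int × Int) : pvInbB n c = true ↔ pvInb n c := by
  simp [pvInbB, pvInb, and_assoc]

lemma pvEnt_set (g : List (List Int)) (y x v : Int) (i j : Nat) :
    pvEnt (pvSetA g y x v) i j =
      if i = y.toNat ∧ j = x.toNat ∧ (pvEnt g i j).isSome then some v else pvEnt g i j := by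
  by_cases hi : i = y.toNat
  · subst hi
    by_cases hlen : y.toNat < g.length
    · set r : List Int := g.getD y.toNat [] with hrdef
      have hrow : g[y.toNat]? = some r := by
        simp [hrdef, List.getD_eq_getElem?_getD, List.getElem?_eq_getElem hlen]
      have hset : (pvSetA g y x v)[y.toNat]? = some (r.set x.toNat v) := by
        rw [pvSetA, ← hrdef, List.getElem?_set_self hlen]
      by_cases hj : j = x.toNat
      · subst hj
        by_cases hxr : x.toNat < r.length
        · have hv : (r.set x.toNat v)[x.toNat]? = some v := List.getElem?_set_self hxr
          simp [pvEnt, hset, hrow, hxr]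
        · have h1 : (r.set x.toNat v)[x.toNat]? = none := by
            simp; omega
          have h2 : r[x.toNat]? = none := by
            simp; omega
          simp [pvEnt, hset, hrow, h1, h2]
      · have hj' : x.toNat ≠ j := fun h => hj h.symm
        have hv : (r.set x.toNat v)[j]? = r[j]? := by
          rw [List.getElem?_set, if_neg hj']
        simp [pvEnt, hset, hrow, hv, hj]
    · have h1 : g[y.toNat]? = none := by simp; omega
      have h2 : (pvSetA g y x v)[y.toNat]? = none := by
        simp [pvSetA]; omega
      simp [pvEnt, h1, h2]
  · have hi' : y.toNat ≠ i := fun h => hi h.symm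
    have hv : (pvSetA g y x v)[i]? = g[i]? := by
      rw [pvSetA, List.getElem?_set, if_neg hi']
    simp [pvEnt, hv, hi]

lemma pvShape_set (g : List (List Int)) (y x v : Int) :
    (pvSetA g y x v).map List.length = g.map List.length := by
  unfold pvSetA
  rw [List.map_set, List.length_set]
  apply List.ext_getElem?
  intro k
  rw [List.getElem?_set]
  split_ifs with h1 h2
  · subst h1
    have hk : y.toNat < g.length := by simpa using h2
    simp [List.getD_eq_getElem?_getD, List.getElem?_eq_getElem hk]
  · rw [eq_comm, List.getElem?_eq_none_iff]
    simp at h2 ⊢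
    omega
  · rfl

lemma pvShape_mark (g : List (List Int)) (l : List (Int × Int)) :
    (pvMark g l).map List.length = g.map List.length := by
  induction l generalizing g with
  | nil => rfl
  | cons d t ih =>
    calc (pvMark (pvSetA g d.1 d.2 1) t).map List.length
        = (pvSetA g d.1 d.2 1).map List.length := ih _
      _ = g.map List.length := pvShape_set _ _ _ _

lemma pvPre_of_shape (n : Int) (g0 g : List (List Int))
    (hsh : g.map List.length = g0.map List.length) (hd : Pre_get_blanks n g0) :
    Pre_get_blanks n g := by
  have hlen : g.length = g0.length := by
    have := congrArg List.length hsh; simpa using this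
  refine ⟨hlen ▸ hd.1, ?_⟩
  intro r hr
  obtain ⟨i, hi, rfl⟩ := List.getElem_of_mem hr
  have hiN : i < n.toNat := lt_of_lt_of_le hi (List.length_take_le _ _)
  have hig : i < g.length := by
    have := List.length_take (i := n.toNat) (l := g)
    omega
  have hig0 : i < g0.length := by omega
  rw [List.getElem_take]
  have hlenr : (g[i]'hig).length = (g0[i]'hig0).length := by
    have h1 := congrArg (fun l => l[i]?) hsh
    simpa [List.getElem?_eq_getElem, hig, hig0] using h1
  rw [hlenr]
  apply hd.2
  rw [List.mem_take_iff_getElem]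
  exact ⟨i, by omega, rfl⟩

lemma pvEnt_isSome (n : Int) (g : List (List Int)) (c : Int × Int)
    (hd : Pre_get_blanks n g) (hin : pvInb n c) :
    (pvEnt g c.1.toNat c.2.toNat).isSome := by
  obtain ⟨h1, h2, h3, h4⟩ := hin
  have hg : c.1.toNat < g.length := by
    have := hd.1; omega
  have hrow : n.toNat ≤ (g[c.1.toNat]'hg).length := by
    apply hd.2
    rw [List.mem_take_iff_getElem]
    exact ⟨c.1.toNat, by omega, rfl⟩
  have hr2 : c.2.toNat < (g[c.1.toNat]'hg).length := by omega
  simp [pvEnt, List.getElem?_eq_getElem hg, List.getElem?_eq_getElem hr2]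

lemma pvEnt_mark (g : List (List Int)) (l : List (Int × Int))
    (hl : ∀ d ∈ l, 0 ≤ d.1 ∧ 0 ≤ d.2) (i j : Nat) :
    pvEnt (pvMark g l) i j =
      if ((i : Int), (j : Int)) ∈ l ∧ (pvEnt g i j).isSome then some 1 else pvEnt g i j := by
  induction l generalizing g with
  | nil => simp [pvMark]
  | cons d t ih =>
    have hd0 := hl d (by simp)
    have hstep := pvEnt_set g d.1 d.2 1 i j
    have hsome : (pvEnt (pvSetA g d.1 d.2 1) i j).isSome = (pvEnt g i j).isSome := by
      rw [hstep]; split_ifs with h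
      · simp [h.2.2]
      · rfl
    have hcd : (((i : Int), (j : Int)) = d) ↔ (i = d.1.toNat ∧ j = d.2.toNat) := by
      constructor
      · rintro rfl; simp
      · rintro ⟨rfl, rfl⟩
        exact pvIntPair_eq d hd0.1 hd0.2
    have hmk : pvMark g (d :: t) = pvMark (pvSetA g d.1 d.2 1) t := rfl
    rw [hmk, ih _ (fun d' hd' => hl d' (by simp [hd'])), hsome, hstep]
    simp only [List.mem_cons]
    split_ifs <;> tauto

lemma pvZeroB_set (n : Int) (g : List (List Int)) (d d' : Int × Int)
    (h0 : pvZeroB n g d = true) (hne : d' ≠ d) :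
    pvZeroB n (pvSetA g d.1 d.2 1) d' = pvZeroB n g d' := by
  by_cases hin : pvInbB n d' = true
  · have hdin : pvInb n d := by
      have := h0; unfold pvZeroB at this
      rw [Bool.and_eq_true] at this
      exact (pvInbB_iff n d).mp this.1
    have hdin' : pvInb n d' := (pvInbB_iff n d').mp hin
    have hne' : ¬(d'.1.toNat = d.1.toNat ∧ d'.2.toNat = d.2.toNat) := by
      rintro ⟨ha, hb⟩
      apply hne
      calc d' = ((d'.1.toNat : Int), (d'.2.toNat : Int)) :=
            (pvIntPair_eq d' hdin'.1 hdin'.2.2.1).symm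
        _ = ((d.1.toNat : Int), (d.2.toNat : Int)) := by rw [ha, hb]
        _ = d := pvIntPair_eq d hdin.1 hdin.2.2.1
    have hcell : pvCellA (pvSetA g d.1 d.2 1) d'.1 d'.2 = pvCellA g d'.1 d'.2 := by
      rw [pvCellA_eq_ent, pvCellA_eq_ent, pvEnt_set, if_neg]
      intro h; exact hne' ⟨h.1, h.2.1⟩
    unfold pvZeroB
    rw [hcell]
  · have : pvInbB n d' = false := by simpa using hin
    simp [pvZeroB, this]

-- current-board zero test, in terms of the original board and the marked set
lemma pvZeroB_cur (n : Int) (g0 g : List (List Int)) (M : List (Int × Int))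
    (hd : Pre_get_blanks n g0) (_hsh : g.map List.length = g0.map List.length)
    (hb : ∀ i j : Nat, pvEnt g i j =
      if ((i : Int), (j : Int)) ∈ M then some 1 else pvEnt g0 i j) (d : Int × Int) :
    pvZeroB n g d = true ↔ (pvZeroB n g0 d = true ∧ d ∉ M) := by
  by_cases hin : pvInbB n d = true
  · have hdin : pvInb n d := (pvInbB_iff n d).mp hin
    have hb' := hb d.1.toNat d.2.toNat
    rw [pvIntPair_eq d hdin.1 hdin.2.2.1] at hb'
    have hs : (pvEnt g0 d.1.toNat d.2.toNat).isSome := pvEnt_isSome n g0 d hd hdin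
    unfold pvZeroB
    rw [pvCellA_eq_ent, hb', pvCellA_eq_ent (g := g0), hin]
    by_cases hm : d ∈ M
    · simp [hm]
    · simp [hm]
  · have : pvInbB n d = false := by simpa using hin
    simp [pvZeroB, this]

-- ---- the shared one-cell step ----

lemma pvFoldPush (n : Int) (nb : List (Int × Int)) (hnd : nb.Nodup) (g : List (List Int))
    (q : List (Int × Int)) :
    nb.foldl (pvPush n) (g, q) = (pvMark g (pvFresh n g nb), q ++ pvFresh n g nb) := by
  induction nb generalizing g q with
  | nil => simp [pvFresh, pvMark]
  | cons d t ih =>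
    have hdt : d ∉ t := (List.nodup_cons.mp hnd).1
    have hnd' : t.Nodup := (List.nodup_cons.mp hnd).2
    by_cases h0 : pvZeroB n g d = true
    · have hfilter : pvFresh n (pvSetA g d.1 d.2 1) t = pvFresh n g t := by
        unfold pvFresh
        apply List.filter_congr
        intro d' hd'
        exact pvZeroB_set n g d d' h0 (fun h => hdt (h ▸ hd'))
      have hfr : pvFresh n g (d :: t) = d :: pvFresh n g t := by
        simp [pvFresh, h0]
      rw [List.foldl_cons]
      have hpush : pvPush n (g, q) d = (pvSetA g d.1 d.2 1, q ++ [d]) := by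
        simp [pvPush, h0]
      rw [hpush, ih hnd', hfilter, hfr]
      simp [pvMark]
    · have hfr : pvFresh n g (d :: t) = pvFresh n g t := by
        simp [pvFresh, h0]
      rw [List.foldl_cons]
      have hpush : pvPush n (g, q) d = (g, q) := by
        simp [pvPush, h0]
      rw [hpush, ih hnd', hfr]

lemma pvNb_nodup (c : Int × Int) : (pvNb c).Nodup := by
  simp [pvNb, Prod.ext_iff]
  omega

lemma pvNbrsB_nodup (c : Int × Int) : (pvNbrsB c).Nodup := by
  simp [pvNbrsB, Prod.ext_iff]
  omega

lemma pvNbrsB_mem (c d : Int × Int) : d ∈ pvNbrsB c ↔ d ∈ pvNb c := by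
  simp [pvNbrsB, pvNb]
  tauto

lemma pvFoldA_eq (n : Int) (e : Int × Int) (g : List (List Int)) (q : List (Int × Int)) :
    pvDirsA.foldl (fun (s : (List (List Int)) × List (Int × Int)) d =>
        if e.2 + d.1 < 0 ∨ n ≤ e.2 + d.1 ∨ e.1 + d.2 < 0 ∨ n ≤ e.1 + d.2 then s
        else if pvCellA s.1 (e.1 + d.2) (e.2 + d.1) = 0 then
          (pvSetA s.1 (e.1 + d.2) (e.2 + d.1) 1, s.2 ++ [(e.1 + d.2, e.2 + d.1)])
        else s) (g, q)
    = (pvNb e).foldl (pvPush n) (g, q) := by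
  have hmap : pvNb e = pvDirsA.map (fun d => (e.1 + d.2, e.2 + d.1)) := by
    simp [pvNb, pvDirsA, Prod.ext_iff]
    omega
  rw [hmap, List.foldl_map]
  apply PySem.List.foldl_congr_mem
  intro s d _
  by_cases hb : e.2 + d.1 < 0 ∨ n ≤ e.2 + d.1 ∨ e.1 + d.2 < 0 ∨ n ≤ e.1 + d.2
  · rw [if_pos hb]
    have : pvZeroB n s.1 (e.1 + d.2, e.2 + d.1) = false := by
      simp [pvZeroB, pvInbB]
      omega
    simp [pvPush, this]
  · rw [if_neg hb]
    by_cases hc : pvCellA s.1 (e.1 + d.2) (e.2 + d.1) = 0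
    · have : pvZeroB n s.1 (e.1 + d.2, e.2 + d.1) = true := by
        simp [pvZeroB, pvInbB, hc]
        omega
      simp [pvPush, this, hc]
    · have : pvZeroB n s.1 (e.1 + d.2, e.2 + d.1) = false := by
        simp [pvZeroB, pvInbB, hc]
      simp [pvPush, this, hc]

lemma pvFoldB_eq (n : Int) (c : Int × Int) (g : List (List Int)) (q : List (Int × Int)) :
    (pvNbrsB c).foldl (fun (t : (List (List Int)) × List (Int × Int)) d =>
        if 0 ≤ d.1 ∧ d.1 < n ∧ 0 ≤ d.2 ∧ d.2 < n ∧ pvCellA t.1 d.1 d.2 = 0 then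
          (pvSetA t.1 d.1 d.2 1, t.2 ++ [d])
        else t) (g, q)
    = (pvNbrsB c).foldl (pvPush n) (g, q) := by
  apply PySem.List.foldl_congr_mem
  intro s d _
  by_cases h : 0 ≤ d.1 ∧ d.1 < n ∧ 0 ≤ d.2 ∧ d.2 < n ∧ pvCellA s.1 d.1 d.2 = 0
  · have : pvZeroB n s.1 d = true := by
      simp [pvZeroB, pvInbB] at h ⊢
      tauto
    rw [if_pos h]
    simp only [pvPush, this, if_true]
  · have : pvZeroB n s.1 d = false := by
      simp [pvZeroB, pvInbB] at h ⊢
      tauto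
    rw [if_neg h]
    simp [pvPush, this]

-- the step lemma: popping e (from anywhere in the pending list) and pushing the fresh
-- neighbours preserves the invariant and decreases card(U) + |pend| by exactly one
lemma pvInv_step (n : Int) (g0 : List (List Int)) (s e : Int × Int) (g : List (List Int))
    (l₁ l₂ blank : List (Int × Int)) (nb : List (Int × Int))
    (hnd : nb.Nodup) (hmem : ∀ d, d ∈ nb ↔ d ∈ pvNb e)
    (hd : Pre_get_blanks n g0)
    (hinv : pvInv n g0 s g (l₁ ++ e :: l₂) blank) :
    pvInv n g0 s (pvMark g (pvFresh n g nb)) (l₁ ++ l₂ ++ pvFresh n g nb) (blank ++ [e])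
    ∧ (pvU n g0 ((blank ++ [e]) ++ (l₁ ++ l₂ ++ pvFresh n g nb))).card
        + (l₁ ++ l₂ ++ pvFresh n g nb).length + 1
      = (pvU n g0 (blank ++ (l₁ ++ e :: l₂))).card + (l₁ ++ e :: l₂).length := by
  have hz_inb : ∀ {c : Int × Int}, pvZeroB n g0 c = true → pvInb n c := by
    intro c h
    rw [pvZeroB, Bool.and_eq_true] at h
    exact (pvInbB_iff n c).mp h.1
  have hzc : ∀ d, pvZeroB n g d = true ↔
      (pvZeroB n g0 d = true ∧ d ∉ blank ++ (l₁ ++ e :: l₂)) :=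
    fun d => pvZeroB_cur n g0 g _ hd hinv.shape hinv.board d
  have hfmem : ∀ d ∈ pvFresh n g nb,
      pvZeroB n g0 d = true ∧ d ∉ (blank ++ (l₁ ++ e :: l₂)) ∧ d ∈ pvNb e := by
    intro d hdm
    rw [pvFresh, List.mem_filter] at hdm
    obtain ⟨h1, h2⟩ := hdm
    have h3 := (hzc d).mp h2
    exact ⟨h3.1, h3.2, (hmem d).mp h1⟩
  have hfnd : (pvFresh n g nb).Nodup := hnd.filter _
  have heM : e ∈ blank ++ (l₁ ++ e :: l₂) := by simp
  have hM' : ∀ c, (c ∈ (blank ++ [e]) ++ (l₁ ++ l₂ ++ pvFresh n g nb)) ↔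
      (c ∈ blank ++ (l₁ ++ e :: l₂) ∨ c ∈ pvFresh n g nb) := by
    intro c
    simp [List.mem_append, List.mem_cons]
    tauto
  have hndMF : ((blank ++ (l₁ ++ e :: l₂)) ++ pvFresh n g nb).Nodup := by
    refine List.Nodup.append hinv.nodup hfnd ?_
    rw [List.disjoint_right]
    intro a ha
    exact (hfmem a ha).2.1
  have hperm : ((blank ++ [e]) ++ (l₁ ++ l₂ ++ pvFresh n g nb)).Perm
      ((blank ++ (l₁ ++ e :: l₂)) ++ pvFresh n g nb) := by
    have h1 : ((l₁ ++ e :: l₂) ++ pvFresh n g nb).Perm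
        (e :: (l₁ ++ l₂ ++ pvFresh n g nb)) := by
      have := (List.perm_middle (a := e) (l₁ := l₁) (l₂ := l₂)).append_right (pvFresh n g nb)
      simpa using this
    have h2 : (blank ++ (e :: (l₁ ++ l₂ ++ pvFresh n g nb))).Perm
        (blank ++ ((l₁ ++ e :: l₂) ++ pvFresh n g nb)) := List.Perm.append_left _ h1.symm
    have e1 : (blank ++ [e]) ++ (l₁ ++ l₂ ++ pvFresh n g nb)
        = blank ++ (e :: (l₁ ++ l₂ ++ pvFresh n g nb)) := by simp
    have e2 : blank ++ ((l₁ ++ e :: l₂) ++ pvFresh n g nb)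
        = (blank ++ (l₁ ++ e :: l₂)) ++ pvFresh n g nb := by simp
    rw [e1, ← e2]
    exact h2
  have hndM' : ((blank ++ [e]) ++ (l₁ ++ l₂ ++ pvFresh n g nb)).Nodup :=
    (hperm.nodup_iff).mpr hndMF
  have hfnn : ∀ d ∈ pvFresh n g nb, 0 ≤ d.1 ∧ 0 ≤ d.2 := by
    intro d hdm
    have hin := hz_inb (hfmem d hdm).1
    exact ⟨hin.1, hin.2.2.1⟩
  constructor
  · refine ⟨hndM', ?_, ?_, ?_, ?_, ?_, ?_⟩
    · intro c hc
      rcases (hM' c).mp hc with h | h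
      · exact hinv.reach c h
      · obtain ⟨hz0, _, hnb'⟩ := hfmem c h
        exact pvReach.step (hinv.reach e heM) hnb' hz0
    · intro c hc
      rcases (hM' c).mp hc with h | h
      · exact hinv.zero c h
      · exact (hfmem c h).1
    · exact (pvShape_mark _ _).trans hinv.shape
    · intro i j
      rw [pvEnt_mark g _ hfnn i j]
      have hbb := hinv.board i j
      by_cases hcf : ((i : Int), (j : Int)) ∈ pvFresh n g nb
      · have hin : pvInb n ((i : Int), (j : Int)) := hz_inb (hfmem _ hcf).1
        have hsome : (pvEnt g i j).isSome := by
          have hs0 : (pvEnt g0 i j).isSome := by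
            have := pvEnt_isSome n g0 ((i : Int), (j : Int)) hd hin
            simpa using this
          rw [hbb]
          split_ifs
          · simp
          · exact hs0
        rw [if_pos ⟨hcf, hsome⟩, if_pos ((hM' _).mpr (Or.inr hcf))]
      · rw [if_neg (by tauto)]
        rw [hbb]
        have hiff : (((i : Int), (j : Int)) ∈ (blank ++ [e]) ++ (l₁ ++ l₂ ++ pvFresh n g nb)) ↔
            (((i : Int), (j : Int)) ∈ blank ++ (l₁ ++ e :: l₂)) := by
          rw [hM']
          tauto
        by_cases hm : ((i : Int), (j : Int)) ∈ blank ++ (l₁ ++ e :: l₂)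
        · rw [if_pos hm, if_pos (hiff.mpr hm)]
        · rw [if_neg hm, if_neg (fun h => hm (hiff.mp h))]
    · intro c hc d hdnb hdz
      rcases List.mem_append.mp hc with hcb | hce
      · exact (hM' d).mpr (Or.inl (hinv.closed c hcb d hdnb hdz))
      · have hce' : c = e := by simpa using hce
        rw [hce'] at hdnb
        by_cases hdM : d ∈ blank ++ (l₁ ++ e :: l₂)
        · exact (hM' d).mpr (Or.inl hdM)
        · have hzg : pvZeroB n g d = true := (hzc d).mpr ⟨hdz, hdM⟩
          have hdf : d ∈ pvFresh n g nb := by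
            rw [pvFresh, List.mem_filter]
            exact ⟨(hmem d).mpr hdnb, hzg⟩
          exact (hM' d).mpr (Or.inr hdf)
    · exact (hM' s).mpr (Or.inl hinv.start)
  · have hUeq : pvU n g0 ((blank ++ [e]) ++ (l₁ ++ l₂ ++ pvFresh n g nb))
        = pvU n g0 (blank ++ (l₁ ++ e :: l₂)) \ (pvFresh n g nb).toFinset := by
      unfold pvU
      ext c
      simp only [Finset.mem_filter, Finset.mem_sdiff, List.mem_toFinset,
        Bool.and_eq_true, Bool.not_eq_true', List.contains_eq_mem, decide_eq_false_iff_not,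
        hM' c]
      tauto
    have hsub : (pvFresh n g nb).toFinset ⊆ pvU n g0 (blank ++ (l₁ ++ e :: l₂)) := by
      intro c hcm
      rw [List.mem_toFinset] at hcm
      obtain ⟨hz0, hnm, _⟩ := hfmem c hcm
      have hin := hz_inb hz0
      rw [pvU, Finset.mem_filter]
      constructor
      · rw [pvWin, Finset.mem_product]
        simp only [Finset.mem_Icc]
        obtain ⟨a1, a2, a3, a4⟩ := hin
        exact ⟨⟨a1, by omega⟩, ⟨a3, by omega⟩⟩
      · simp [hz0, hnm]
    have hcard : (pvU n g0 ((blank ++ [e]) ++ (l₁ ++ l₂ ++ pvFresh n g nb))).card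
        = (pvU n g0 (blank ++ (l₁ ++ e :: l₂))).card - (pvFresh n g nb).length := by
      rw [hUeq, Finset.card_sdiff, Finset.inter_eq_left.mpr hsub,
        List.toFinset_card_of_nodup hfnd]
    have hle : (pvFresh n g nb).length ≤ (pvU n g0 (blank ++ (l₁ ++ e :: l₂))).card := by
      have := Finset.card_le_card hsub
      rwa [List.toFinset_card_of_nodup hfnd] at this
    rw [hcard]
    simp only [List.length_append, List.length_cons]
    omega

-- ---- running the two loops ----

lemma pvLoopA_run (n : Int) (g0 : List (List Int)) (s : Int × Int) (hd : Pre_get_blanks n g0) :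
    ∀ fuel (g : List (List Int)) (q blank : List (Int × Int)),
      pvInv n g0 s g q blank →
      (pvU n g0 (blank ++ q)).card + q.length < fuel →
      ∃ G B, pvLoopA n fuel g q blank = (G, B) ∧ pvInv n g0 s G [] B := by
  intro fuel
  induction fuel with
  | zero => intro g q blank _ hmu; omega
  | succ fuel ih =>
    intro g q blank hinv hmu
    by_cases hq : q = []
    · subst hq
      exact ⟨g, blank, by simp [pvLoopA], hinv⟩
    · have hsplit : q.dropLast ++ [q.getLast hq] = q := List.dropLast_append_getLast hq
      have hstep : pvLoopA n (fuel+1) g q blank =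
          pvLoopA n fuel (pvMark g (pvFresh n g (pvNb (q.getLast hq))))
            (q.dropLast ++ pvFresh n g (pvNb (q.getLast hq))) (blank ++ [q.getLast hq]) := by
        have hgd : q.getLastD (0, 0) = q.getLast hq := by
          conv_lhs => rw [← hsplit]
          rw [List.getLastD_concat]
        simp only [pvLoopA, if_neg hq, hgd, pvFoldA_eq, pvFoldPush n _ (pvNb_nodup _)]
      have hinv' : pvInv n g0 s g (q.dropLast ++ q.getLast hq :: []) blank := by
        rw [← hsplit] at hinv
        exact hinv
      obtain ⟨hinv2, hcard⟩ := pvInv_step n g0 s (q.getLast hq) g q.dropLast [] blank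
        (pvNb (q.getLast hq)) (pvNb_nodup _) (fun d => Iff.rfl) hd hinv'
      simp only [List.append_nil] at hinv2 hcard
      have hmu' : (pvU n g0 ((blank ++ [q.getLast hq]) ++
            (q.dropLast ++ pvFresh n g (pvNb (q.getLast hq))))).card
          + (q.dropLast ++ pvFresh n g (pvNb (q.getLast hq))).length < fuel := by
        have hrw : blank ++ (q.dropLast ++ q.getLast hq :: []) = blank ++ q :=
          congrArg (blank ++ ·) hsplit
        rw [hrw] at hcard
        have hlq : (q.dropLast ++ q.getLast hq :: []).length = q.length :=
          congrArg List.length hsplit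
        omega
      obtain ⟨G, B, hrun, hfin⟩ := ih _ _ _ hinv2 hmu'
      exact ⟨G, B, by rw [hstep, hrun], hfin⟩

lemma pvLayerB_run (n : Int) (g0 : List (List Int)) (s : Int × Int) (hd : Pre_get_blanks n g0) :
    ∀ (fr : List (Int × Int)) (g : List (List Int)) (nxt blank : List (Int × Int)),
      pvInv n g0 s g (fr ++ nxt) blank →
      ∃ G NX, pvLayerB n fr g nxt blank = (G, NX, blank ++ fr)
        ∧ pvInv n g0 s G NX (blank ++ fr)
        ∧ (pvU n g0 ((blank ++ fr) ++ NX)).card + NX.length + fr.length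
            = (pvU n g0 (blank ++ (fr ++ nxt))).card + (fr ++ nxt).length := by
  intro fr
  induction fr with
  | nil =>
    intro g nxt blank hinv
    refine ⟨g, nxt, by simp [pvLayerB], ?_, by simp⟩
    simpa using hinv
  | cons c fr' ih =>
    intro g nxt blank hinv
    have hlayer : pvLayerB n (c :: fr') g nxt blank =
        pvLayerB n fr' (pvMark g (pvFresh n g (pvNbrsB c)))
          (nxt ++ pvFresh n g (pvNbrsB c)) (blank ++ [c]) := by
      simp only [pvLayerB, List.foldl_cons, pvFoldB_eq, pvFoldPush n _ (pvNbrsB_nodup _)]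
    have hinv' : pvInv n g0 s g ([] ++ c :: (fr' ++ nxt)) blank := by
      simpa using hinv
    obtain ⟨hinv2, hcard⟩ := pvInv_step n g0 s c g [] (fr' ++ nxt) blank
      (pvNbrsB c) (pvNbrsB_nodup c) (pvNbrsB_mem c) hd hinv'
    have hinv3 : pvInv n g0 s (pvMark g (pvFresh n g (pvNbrsB c)))
        (fr' ++ (nxt ++ pvFresh n g (pvNbrsB c))) (blank ++ [c]) := by
      simpa [List.append_assoc] using hinv2
    obtain ⟨G, NX, hrun, hfin, hcard2⟩ := ih _ _ _ hinv3
    refine ⟨G, NX, ?_, ?_, ?_⟩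
    · rw [hlayer, hrun]
      simp
    · simpa [List.append_assoc] using hfin
    · simp only [List.append_assoc, List.cons_append, List.nil_append,
        List.length_append, List.length_cons] at hcard hcard2 ⊢
      omega

lemma pvLoopB_run (n : Int) (g0 : List (List Int)) (s : Int × Int) (hd : Pre_get_blanks n g0) :
    ∀ fuel (g : List (List Int)) (fr blank : List (Int × Int)),
      pvInv n g0 s g fr blank →
      (pvU n g0 (blank ++ fr)).card + fr.length < fuel →
      ∃ G B, pvLoopB n fuel g fr blank = (G, B) ∧ pvInv n g0 s G [] B := by
  intro fuel
  induction fuel with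
  | zero => intro g fr blank _ hmu; omega
  | succ fuel ih =>
    intro g fr blank hinv hmu
    by_cases hq : fr = []
    · subst hq
      exact ⟨g, blank, by simp [pvLoopB], hinv⟩
    · have hinv' : pvInv n g0 s g (fr ++ []) blank := by simpa using hinv
      obtain ⟨G, NX, hrun, hfin, hcard⟩ := pvLayerB_run n g0 s hd fr g [] blank hinv'
      have hfr1 : 1 ≤ fr.length := by
        cases fr with
        | nil => exact absurd rfl hq
        | cons a t => simp
      have hmu' : (pvU n g0 ((blank ++ fr) ++ NX)).card + NX.length < fuel := by
        simp only [List.append_nil] at hcard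
        omega
      obtain ⟨G2, B2, hrun2, hfin2⟩ := ih G NX (blank ++ fr) hfin hmu'
      refine ⟨G2, B2, ?_, hfin2⟩
      simp only [pvLoopB, if_neg hq]
      rw [hrun, hrun2]

-- ---- extracting the answer from a final invariant ----

lemma pvInv_final_mem (n : Int) (g0 : List (List Int)) (s : Int × Int) (g : List (List Int))
    (blank : List (Int × Int)) (hinv : pvInv n g0 s g [] blank) :
    ∀ c, c ∈ blank ↔ pvReach n g0 s c := by
  intro c
  constructor
  · intro hc
    exact hinv.reach c (by simpa using hc)
  · intro hr
    induction hr with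
    | refl => simpa using hinv.start
    | step hr' hnb hz ih =>
      have := hinv.closed _ (by simpa using ih) _ hnb hz
      simpa using this

lemma pvEnt_ext (a b : List (List Int)) (hsh : a.map List.length = b.map List.length)
    (h : ∀ i j : Nat, pvEnt a i j = pvEnt b i j) : a = b := by
  have hlen : a.length = b.length := by
    have := congrArg List.length hsh
    simpa using this
  apply List.ext_getElem?
  intro i
  by_cases hi : i < a.length
  · have hib : i < b.length := by omega
    rw [List.getElem?_eq_getElem hi, List.getElem?_eq_getElem hib]
    refine congrArg some (List.ext_getElem? ?_)
    intro j
    have hrow := h i j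
    simpa [pvEnt, List.getElem?_eq_getElem hi, List.getElem?_eq_getElem hib] using hrow
  · rw [List.getElem?_eq_none (by omega), List.getElem?_eq_none (by omega)]

lemma pvSorted2_eq_of_perm (xs ys : List (Int × Int)) (hx : xs.Nodup) (hp : xs.Perm ys) :
    PySem.List.sorted2 xs Prod.fst Prod.snd = PySem.List.sorted2 ys Prod.fst Prod.snd := by
  have hkey : ∀ zs : List (Int × Int), PySem.List.sorted2 zs Prod.fst Prod.snd
      = PySem.List.sorted zs (fun p => (toLex p : Lex (Int × Int))) false := by
    intro zs
    rw [PySem.List.sorted_eq_foldl_insertBy]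
    have hfun : (fun a b : Int × Int =>
          decide (a.1 < b.1) || (!decide (b.1 < a.1) && decide (a.2 < b.2)))
        = (fun a b : Int × Int =>
          decide ((toLex a : Lex (Int × Int)) < toLex b)) := by
      funext a b
      have : ((toLex a : Lex (Int × Int)) < toLex b) ↔
          (a.1 < b.1 ∨ a.1 = b.1 ∧ a.2 < b.2) := Prod.Lex.lt_iff
      rw [Bool.eq_iff_iff]
      simp only [Bool.or_eq_true, Bool.and_eq_true, Bool.not_eq_true', decide_eq_true_eq,
        decide_eq_false_iff_not, this]
      omega
    simp only [PySem.List.sorted2]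
    rw [hfun]
    rfl
  have hndy : ys.Nodup := (hp.nodup_iff).mp hx
  have hinj : Function.Injective (fun p : Int × Int => (toLex p : Lex (Int × Int))) :=
    toLex.injective
  have h1 : (PySem.List.sorted ys (fun p => (toLex p : Lex (Int × Int))) false).Perm xs :=
    (PySem.List.sorted_perm ys _ false).trans hp.symm
  have hpair := PySem.List.sorted_pairwise ys (fun p => (toLex p : Lex (Int × Int)))
  have hndz : (PySem.List.sorted ys (fun p => (toLex p : Lex (Int × Int))) false).Nodup :=
    ((PySem.List.sorted_perm ys _ false).nodup_iff).mpr hndy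
  have hlt : List.Pairwise
      (fun a b : Int × Int => (toLex a : Lex (Int × Int)) < toLex b)
      (PySem.List.sorted ys (fun p => (toLex p : Lex (Int × Int))) false) := by
    refine (List.Pairwise.and hndz hpair).imp ?_
    rintro a b ⟨hne, hle⟩
    exact lt_of_le_of_ne hle (fun hk => hne (hinj hk))
  have hmain := PySem.List.sorted_eq_of_perm_of_pairwise_lt xs
    (PySem.List.sorted ys (fun p => (toLex p : Lex (Int × Int))) false) _ h1 hlt
  rw [hkey xs, hkey ys]
  exact hmain

lemma pvInv_init (n : Int) (g : List (List Int)) (s : Int × Int)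
    (hd : Pre_get_blanks n g) (hz : pvZeroB n g s = true) :
    pvInv n g s (pvSetA g s.1 s.2 1) [s] [] := by
  have hin : pvInb n s := by
    have h := hz
    rw [pvZeroB, Bool.and_eq_true] at h
    exact (pvInbB_iff n s).mp h.1
  have hsome := pvEnt_isSome n g s hd hin
  refine ⟨by simp, ?_, ?_, pvShape_set _ _ _ _, ?_, by simp, by simp⟩
  · intro c hc
    have : c = s := by simpa using hc
    rw [this]
    exact pvReach.refl
  · intro c hc
    have : c = s := by simpa using hc
    rw [this]
    exact hz
  · intro i j
    rw [pvEnt_set]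
    have hmem_iff : (((i : Int), (j : Int)) ∈ ([] : List (Int × Int)) ++ [s]) ↔
        (i = s.1.toNat ∧ j = s.2.toNat) := by
      simp only [List.nil_append, List.mem_singleton]
      constructor
      · intro h
        constructor
        · rw [← h]; simp
        · rw [← h]; simp
      · rintro ⟨rfl, rfl⟩
        exact pvIntPair_eq s hin.1 hin.2.2.1
    by_cases hm : i = s.1.toNat ∧ j = s.2.toNat
    · have hsome' : (pvEnt g i j).isSome := by
        rw [hm.1, hm.2]
        exact hsome
      rw [if_pos ⟨hm.1, hm.2, hsome'⟩, if_pos (hmem_iff.mpr hm)]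
    · rw [if_neg (fun h => hm ⟨h.1, h.2.1⟩), if_neg (fun h => hm (hmem_iff.mp h))]

lemma pvFuel_ok (n : Int) (g : List (List Int)) (s : Int × Int) (hz : pvZeroB n g s = true) :
    (pvU n g ([] ++ [s])).card + 1 < n.toNat * n.toNat + 1 := by
  have hin : pvInb n s := by
    have h := hz
    rw [pvZeroB, Bool.and_eq_true] at h
    exact (pvInbB_iff n s).mp h.1
  obtain ⟨a1, a2, a3, a4⟩ := hin
  have hsWin : s ∈ pvWin n := by
    rw [pvWin, Finset.mem_product]
    simp only [Finset.mem_Icc]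
    exact ⟨⟨a1, by omega⟩, ⟨a3, by omega⟩⟩
  have hsub : pvU n g ([] ++ [s]) ⊆ (pvWin n).erase s := by
    intro c hc
    rw [pvU, Finset.mem_filter] at hc
    obtain ⟨hw, hcc⟩ := hc
    rw [Finset.mem_erase]
    refine ⟨?_, hw⟩
    rw [Bool.and_eq_true, Bool.not_eq_true', List.contains_eq_mem, decide_eq_false_iff_not] at hcc
    simpa using hcc.2
  have hcard := Finset.card_le_card hsub
  rw [Finset.card_erase_of_mem hsWin] at hcard
  have hwin : (pvWin n).card = n.toNat * n.toNat := by
    rw [pvWin, Finset.card_product, Int.card_Icc]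
    have hx : n - 1 + 1 - 0 = n := by ring
    rw [hx]
  rw [hwin] at hcard
  have h1 : 1 ≤ n.toNat := by omega
  have h2 : 1 ≤ n.toNat * n.toNat := by
    have := Nat.mul_le_mul h1 h1
    simpa using this
  omega

-- ---- the per-component equality ----

lemma pvComp_eq (n : Int) (g : List (List Int)) (y x : Int)
    (hd : Pre_get_blanks n g) (hz : pvZeroB n g (y, x) = true) :
    ∃ G bA bB,
      pvLoopA n (n.toNat * n.toNat + 1) (pvSetA g y x 1) [(y, x)] [] = (G, bA) ∧
      pvLoopB n (n.toNat * n.toNat + 1) (pvSetA g y x 1) [(y, x)] [] = (G, bB) ∧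
      PySem.List.sorted2 bA Prod.fst Prod.snd = PySem.List.sorted2 bB Prod.fst Prod.snd ∧
      G.map List.length = g.map List.length := by
  have hinit := pvInv_init n g (y, x) hd hz
  have hfuel := pvFuel_ok n g (y, x) hz
  obtain ⟨GA, BA, hA, hfinA⟩ := pvLoopA_run n g (y, x) hd (n.toNat * n.toNat + 1)
    (pvSetA g y x 1) [(y, x)] [] hinit (by simpa using hfuel)
  obtain ⟨GB, BB, hB, hfinB⟩ := pvLoopB_run n g (y, x) hd (n.toNat * n.toNat + 1)
    (pvSetA g y x 1) [(y, x)] [] hinit (by simpa using hfuel)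
  have hmemA := pvInv_final_mem n g (y, x) GA BA hfinA
  have hmemB := pvInv_final_mem n g (y, x) GB BB hfinB
  have hndA : BA.Nodup := by
    have := hfinA.nodup
    simpa using this
  have hndB : BB.Nodup := by
    have := hfinB.nodup
    simpa using this
  have hpermAB : BA.Perm BB :=
    (List.perm_ext_iff_of_nodup hndA hndB).mpr (fun c => (hmemA c).trans (hmemB c).symm)
  have hGeq : GB = GA := by
    apply pvEnt_ext GB GA (hfinB.shape.trans hfinA.shape.symm)
    intro i j
    rw [hfinB.board i j, hfinA.board i j]
    simp only [List.append_nil]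
    by_cases hm : ((i : Int), (j : Int)) ∈ BB
    · rw [if_pos hm, if_pos ((hmemA _).mpr ((hmemB _).mp hm))]
    · rw [if_neg hm, if_neg (fun h => hm ((hmemB _).mpr ((hmemA _).mp h)))]
  refine ⟨GA, BA, BB, hA, ?_, pvSorted2_eq_of_perm BA BB hndA hpermAB, hfinA.shape⟩
  exact hB.trans (by rw [hGeq])

-- ---- the outer row-major scan ----

lemma pvInner_eq (n : Int) (g0 : List (List Int)) (hd : Pre_get_blanks n g0) (y : Int)
    (hy : 0 ≤ y ∧ y < n) :
    ∀ (xs : List Int), (∀ x ∈ xs, 0 ≤ x ∧ x < n) →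
    ∀ (g : List (List Int)) (bl : List (List (Int × Int))),
      g.map List.length = g0.map List.length →
      (xs.foldl (fun st x =>
          if pvCellA st.1 y x = 0 then
            ((pvLoopA n (n.toNat * n.toNat + 1) (pvSetA st.1 y x 1) [(y, x)] []).1,
             st.2 ++ [(PySem.List.sorted2
                (pvLoopA n (n.toNat * n.toNat + 1) (pvSetA st.1 y x 1) [(y, x)] []).2
                Prod.fst Prod.snd).map (fun p => (p.1 - y, p.2 - x))])
          else st) (g, bl))
      = (xs.foldl (fun st x =>
          if pvCellA st.1 y x ≠ 0 then st
          else
            ((pvLoopB n (n.toNat * n.toNat + 1) (pvSetA st.1 y x 1) [(y, x)] []).1,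
             st.2 ++ [(PySem.List.sorted2
                (pvLoopB n (n.toNat * n.toNat + 1) (pvSetA st.1 y x 1) [(y, x)] []).2
                Prod.fst Prod.snd).map (fun p => (p.1 - y, p.2 - x))])) (g, bl))
      ∧ (xs.foldl (fun st x =>
          if pvCellA st.1 y x = 0 then
            ((pvLoopA n (n.toNat * n.toNat + 1) (pvSetA st.1 y x 1) [(y, x)] []).1,
             st.2 ++ [(PySem.List.sorted2
                (pvLoopA n (n.toNat * n.toNat + 1) (pvSetA st.1 y x 1) [(y, x)] []).2
                Prod.fst Prod.snd).map (fun p => (p.1 - y, p.2 - x))])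
          else st) (g, bl)).1.map List.length = g0.map List.length := by
  intro xs
  induction xs with
  | nil =>
    intro _ g bl hsk
    exact ⟨rfl, hsk⟩
  | cons x xs' ih =>
    intro hxs g bl hsk
    have hx := hxs x (by simp)
    have hxs' : ∀ z ∈ xs', 0 ≤ z ∧ z < n := fun z hz => hxs z (by simp [hz])
    have hdg : Pre_get_blanks n g := pvPre_of_shape n g0 g hsk hd
    simp only [List.foldl_cons]
    by_cases hc : pvCellA g y x = 0
    · have hzb : pvZeroB n g (y, x) = true := by
        simp only [pvZeroB, pvInbB, Bool.and_eq_true, decide_eq_true_eq, beq_iff_eq]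
        exact ⟨⟨⟨⟨hy.1, hy.2⟩, hx.1⟩, hx.2⟩, hc⟩
      obtain ⟨G, bA, bB, hA, hB, hsort, hshape⟩ := pvComp_eq n g y x hdg hzb
      have hcB : ¬(pvCellA g y x ≠ 0) := fun h => h hc
      rw [if_pos hc, if_neg hcB, hA, hB]
      have hmap : (PySem.List.sorted2 bA Prod.fst Prod.snd).map (fun p => (p.1 - y, p.2 - x))
          = (PySem.List.sorted2 bB Prod.fst Prod.snd).map (fun p => (p.1 - y, p.2 - x)) := by
        rw [hsort]
      simp only
      rw [hmap]
      exact ih hxs' G _ (hshape.trans hsk)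
    · have hcB : pvCellA g y x ≠ 0 := hc
      rw [if_neg hc, if_pos hcB]
      exact ih hxs' g bl hsk

lemma pvOuter_eq (n : Int) (g0 : List (List Int)) (hd : Pre_get_blanks n g0) :
    ∀ (ys : List Int), (∀ y ∈ ys, 0 ≤ y ∧ y < n) →
    ∀ (g : List (List Int)) (bl : List (List (Int × Int))),
      g.map List.length = g0.map List.length →
      (ys.foldl (fun (st : (List (List Int)) × List (List (Int × Int))) y =>
        (PySem.List.pyRange 0 n 1).foldl (fun st x =>
          if pvCellA st.1 y x = 0 then
            ((pvLoopA n (n.toNat * n.toNat + 1) (pvSetA st.1 y x 1) [(y, x)] []).1,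
             st.2 ++ [(PySem.List.sorted2
                (pvLoopA n (n.toNat * n.toNat + 1) (pvSetA st.1 y x 1) [(y, x)] []).2
                Prod.fst Prod.snd).map (fun p => (p.1 - y, p.2 - x))])
          else st) st) (g, bl))
      = (ys.foldl (fun (st : (List (List Int)) × List (List (Int × Int))) y =>
        (PySem.List.pyRange 0 n 1).foldl (fun st x =>
          if pvCellA st.1 y x ≠ 0 then st
          else
            ((pvLoopB n (n.toNat * n.toNat + 1) (pvSetA st.1 y x 1) [(y, x)] []).1,
             st.2 ++ [(PySem.List.sorted2
                (pvLoopB n (n.toNat * n.toNat + 1) (pvSetA st.1 y x 1) [(y, x)] []).2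
                Prod.fst Prod.snd).map (fun p => (p.1 - y, p.2 - x))])) st) (g, bl)) := by
  intro ys
  induction ys with
  | nil => intro _ g bl _; rfl
  | cons y ys' ih =>
    intro hys g bl hsk
    have hy := hys y (by simp)
    have hys' : ∀ z ∈ ys', 0 ≤ z ∧ z < n := fun z hz => hys z (by simp [hz])
    have hxmem : ∀ x ∈ PySem.List.pyRange 0 n 1, 0 ≤ x ∧ x < n := by
      intro x hx
      exact PySem.List.mem_pyRange_one.mp hx
    obtain ⟨heq, hshape⟩ := pvInner_eq n g0 hd y hy (PySem.List.pyRange 0 n 1) hxmem g bl hsk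
    simp only [List.foldl_cons]
    rw [← heq]
    exact ih hys' _ _ hshape

-- ===== VERDICT (by name: the statement is the Claim_ definition above) =====
theorem get_blanks_spec : Claim_equal_get_blanks := by
  intro n game_board _ hpre
  show get_blanks n game_board = get_blanks_alt n game_board
  unfold get_blanks get_blanks_alt
  have h := pvOuter_eq n game_board hpre (PySem.List.pyRange 0 n 1)
    (fun y hy => PySem.List.mem_pyRange_one.mp hy) game_board [] rfl
  exact congrArg Prod.snd h
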